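-- pv_equiv track=rewrite | github.com/Enjef/Algo | 1800 - 1899/1894 - Find the Student that Will Replace the Chalk/1894 - Find the Student that Will Replace the Chalk.py | chalkReplacer_best_bin_search
-- ===== SOURCE A (Python) =====
-- from typing import List
--
-- def chalkReplacer_best_bin_search(chalk: List[int], k: int) -> int:
--     sums = sum(chalk)
--     l = 0
--     r = k//sums + 1
--     while l < r:
--         mid = (l+r) // 2
--         if sums * mid > k:
--             r = mid
--         else:
--             l = mid + 1
--     k -= sums*(l-1)
--     pos = 0
--     while k >= 0:
--         if chalk[pos] <= k:
--             k -= chalk[pos]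
--             pos += 1
--         else:
--             return pos
-- ===== SOURCE B (Python) =====
-- from typing import List
--
-- def chalkReplacer_best_bin_search(chalk: List[int], k: int) -> int:
--     sums = sum(chalk)
--     k %= sums
--     for i, c in enumerate(chalk):
--         if c > k:
--             return i
--         k -= c
-- ===== Notes on version B (the rewrite author's own statement) =====
-- stated objective: simpler
-- what changed: Replaces the hand-written binary search for the right multiple of sum(chalk) with a single closed-form modulo k %= sums, and the index-based while-scan with a plain enumerate loop.
-- outside the precondition, e.g. on chalkReplacer_best_bin_search([1, 1, -3], 2): A returns 1, B returns 0
import Mathlib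
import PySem

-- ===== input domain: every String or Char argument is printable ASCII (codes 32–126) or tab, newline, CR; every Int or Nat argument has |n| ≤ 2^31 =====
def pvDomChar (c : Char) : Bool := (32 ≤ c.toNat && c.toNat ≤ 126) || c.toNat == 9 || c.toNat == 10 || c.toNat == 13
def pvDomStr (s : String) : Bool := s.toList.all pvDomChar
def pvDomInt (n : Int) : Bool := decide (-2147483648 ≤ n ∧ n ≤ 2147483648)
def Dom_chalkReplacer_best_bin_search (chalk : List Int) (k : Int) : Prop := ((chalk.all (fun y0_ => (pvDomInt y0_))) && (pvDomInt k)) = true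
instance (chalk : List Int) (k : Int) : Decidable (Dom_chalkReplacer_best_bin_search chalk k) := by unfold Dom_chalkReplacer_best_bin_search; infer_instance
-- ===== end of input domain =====

-- B drops A's hand-written binary search for the multiple of sum(chalk) in favour of a closed-form modulo,
-- and replaces the index-based while-scan by a plain enumerate loop; return value only, no mutation.

-- ===== PORT A =====
-- the 'while l < r' binary-search loop of A, recursion on the shrinking gap r - l
def pvBinA (sums k l r : Int) : Int :=
  if h : l < r then
    let mid := PySem.Int.floordiv (l + r) 2
    if sums * mid > k then pvBinA sums k l mid
    else pvBinA sums k (mid + 1) r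
  else l
termination_by (r - l).toNat
decreasing_by
  · have h1 : mid < r := by
      have := (PySem.Int.floordiv_lt_iff_lt_mul (a := l + r) (b := 2) (q := r) (by omega)).mpr (by omega)
      simpa [mid] using this
    have h2 : l ≤ mid := by
      have := (PySem.Int.le_floordiv_iff_mul_le (a := l + r) (b := 2) (q := l) (by omega)).mpr (by omega)
      simpa [mid] using this
    omega
  · have h2 : l ≤ mid := by
      have := (PySem.Int.le_floordiv_iff_mul_le (a := l + r) (b := 2) (q := l) (by omega)).mpr (by omega)
      simpa [mid] using this
    omega

-- pyGet? returns some only inside the list; needed for termination of the while-scan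
theorem pvGet?_lt_length {α : Type} (xs : List α) (i : Int) (c : α)
    (h : PySem.List.pyGet? xs i = some c) : i < (xs.length : Int) := by
  by_contra hc
  unfold PySem.List.pyGet? PySem.List.pyIdx? at h
  split_ifs at h <;> simp_all <;> omega

-- the 'while k >= 0' scan of A; 0 stands for Python's None / IndexError, both outside Pre_
def pvScanA (chalk : List Int) (pos k : Int) : Int :=
  if k < 0 then 0
  else
    match hg : PySem.List.pyGet? chalk pos with
    | none => 0
    | some c => if c ≤ k then pvScanA chalk (pos + 1) (k - c) else pos
termination_by ((chalk.length : Int) - pos).toNat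
decreasing_by
  have := pvGet?_lt_length chalk pos c hg
  omega

def chalkReplacer_best_bin_search (chalk : List Int) (k : Int) : Int :=
  let sums := chalk.sum
  let r := PySem.Int.floordiv k sums + 1
  let l := pvBinA sums k 0 r
  pvScanA chalk 0 (k - sums * (l - 1))

-- ===== PORT B =====
-- the enumerate loop of B, structural on the list; 0 stands for falling off the end (outside Pre_)
def pvScanB (l : List Int) (i k : Int) : Int :=
  match l with
  | [] => 0
  | c :: t => if c > k then i else pvScanB t (i + 1) (k - c)

def chalkReplacer_best_bin_search_alt (chalk : List Int) (k : Int) : Int :=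
  let sums := chalk.sum
  pvScanB chalk 0 (PySem.Int.mod k sums)

-- ===== PRECONDITION & SPEC =====
-- Pre_ excludes inputs where A raises ZeroDivisionError (sum = 0) or returns None (k < -sum), and the
-- negative-total inputs (sum < 0), on which A's floor-division/scan behaviour is an accident of its search.
def Pre_chalkReplacer_best_bin_search (chalk : List Int) (k : Int) : Prop :=
  0 < chalk.sum ∧ -chalk.sum ≤ k
instance (chalk : List Int) (k : Int) : Decidable (Pre_chalkReplacer_best_bin_search chalk k) := by
  unfold Pre_chalkReplacer_best_bin_search; infer_instance

def pvWitness_chalkReplacer_best_bin_search : List Int × Int := ([3, 4, 1, 2], 25)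

def Spec_chalkReplacer_best_bin_search (chalk : List Int) (k : Int) (out : Int) : Prop := out = chalkReplacer_best_bin_search_alt chalk k
instance (chalk : List Int) (k : Int) (out : Int) : Decidable (Spec_chalkReplacer_best_bin_search chalk k out) := by unfold Spec_chalkReplacer_best_bin_search; infer_instance

-- ===== CLAIM (what is proved, stated in full; the proofs are below) =====
def Claim_equal_chalkReplacer_best_bin_search : Prop := ∀ (chalk : List Int) (k : Int), Dom_chalkReplacer_best_bin_search chalk k → Pre_chalkReplacer_best_bin_search chalk k → Spec_chalkReplacer_best_bin_search chalk k (chalkReplacer_best_bin_search chalk k)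

-- ===== LEMMAS AND PROOFS =====

-- binary-search invariant: result L keeps sums*(L-1) ≤ k < sums*L
theorem pvBinA_spec (sums k : Int) : ∀ n (l r : Int), (r - l).toNat = n →
    sums * (l - 1) ≤ k → k < sums * r → l ≤ r →
    sums * (pvBinA sums k l r - 1) ≤ k ∧ k < sums * pvBinA sums k l r := by
  intro n
  induction n using Nat.strong_induction_on with
  | _ n ih =>
    intro l r hn hl hr hlr
    rw [pvBinA]
    by_cases h : l < r
    · simp only [h, dif_pos]
      set mid := PySem.Int.floordiv (l + r) 2 with hmid
      have h1 : mid < r := by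
        have := (PySem.Int.floordiv_lt_iff_lt_mul (a := l + r) (b := 2) (q := r) (by omega)).mpr (by omega)
        simpa [hmid] using this
      have h2 : l ≤ mid := by
        have := (PySem.Int.le_floordiv_iff_mul_le (a := l + r) (b := 2) (q := l) (by omega)).mpr (by omega)
        simpa [hmid] using this
      by_cases hp : sums * mid > k
      · simp only [hp, if_pos]
        exact ih ((mid - l).toNat) (by omega) l mid rfl hl hp h2
      · simp only [hp, if_neg, not_false_iff]
        push_neg at hp
        exact ih ((r - (mid + 1)).toNat) (by omega) (mid + 1) r rfl (by simpa using hp) hr (by omega)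
    · simp only [h, dif_neg, not_false_iff]
      have : l = r := le_antisymm hlr (not_lt.mp h)
      subst this
      exact ⟨hl, hr⟩

-- A's reduced chalk budget is exactly k mod sums
theorem pvReduce_eq_mod (sums k : Int) (hs : 0 < sums) (hk : -sums ≤ k) :
    k - sums * (pvBinA sums k 0 (PySem.Int.floordiv k sums + 1) - 1) = PySem.Int.mod k sums := by
  have hq := (PySem.Int.floordiv_eq_iff_of_pos (a := k) (b := sums) (q := PySem.Int.floordiv k sums) hs).mp rfl
  have hq0 : -1 ≤ PySem.Int.floordiv k sums :=
    (PySem.Int.le_floordiv_iff_mul_le (b := sums) hs).mpr (by omega)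
  have hspec := pvBinA_spec sums k _ 0 (PySem.Int.floordiv k sums + 1) rfl
    (by omega) (by nlinarith [hq.2]) (by omega)
  set L := pvBinA sums k 0 (PySem.Int.floordiv k sums + 1) with hL
  have hfd : PySem.Int.floordiv k sums = L - 1 := by
    have := (PySem.Int.floordiv_eq_iff_of_pos (a := k) (b := sums) (q := L - 1) hs).mpr
      ⟨by linarith [hspec.1], by nlinarith [hspec.2]⟩
    omega
  have hmm := PySem.Int.floordiv_mul_add_mod k sums
  rw [hfd] at hmm
  linarith [hmm]

-- the two scans agree on any suffix while the budget stays below the suffix sum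
theorem pvScan_eq (t : List Int) : ∀ (chalk : List Int) (pos k : Int), 0 ≤ pos → 0 ≤ k →
    k < t.sum → chalk.drop pos.toNat = t → pvScanA chalk pos k = pvScanB t pos k := by
  induction t with
  | nil => intro chalk pos k _ hk hlt _; simp at hlt; omega
  | cons c t ih =>
    intro chalk pos k hpos hk hlt hdrop
    have hget : PySem.List.pyGet? chalk pos = some c := by
      have hcast : pos = ((pos.toNat : Nat) : Int) := by omega
      have hlen : pos.toNat < chalk.length := by
        by_contra hc
        rw [List.drop_eq_nil_of_le (by omega)] at hdrop
        exact List.cons_ne_nil _ _ hdrop.symm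
      rw [hcast, PySem.List.pyGet?_natCast]
      rw [← List.head?_drop, hdrop]
      rfl
    have hdrop' : chalk.drop (pos + 1).toNat = t := by
      have h1 : (pos + 1).toNat = pos.toNat + 1 := by omega
      rw [h1, ← List.drop_drop, hdrop]
      rfl
    rw [pvScanA]
    simp only [not_lt.mpr hk, if_neg, not_false_iff]
    rw [pvScanB]
    split
    · rename_i heq; rw [hget] at heq; cases heq
    · rename_i c' heq
      rw [hget] at heq
      cases heq
      by_cases hc : c ≤ k
      · simp only [hc, if_pos, not_lt.mpr hc, if_neg]
        exact ih chalk (pos + 1) (k - c) (by omega) (by omega)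
          (by simp at hlt; omega) hdrop'
      · simp [hc, not_le.mp hc]

-- ===== VERDICT (by name: the statement is the Claim_ definition above) =====
theorem chalkReplacer_best_bin_search_spec : Claim_equal_chalkReplacer_best_bin_search := by
  intro chalk k _ hpre
  obtain ⟨hs, hk⟩ := hpre
  unfold Spec_chalkReplacer_best_bin_search
  unfold chalkReplacer_best_bin_search chalkReplacer_best_bin_search_alt
  simp only []
  rw [pvReduce_eq_mod chalk.sum k hs hk]
  exact pvScan_eq chalk chalk 0 (PySem.Int.mod k chalk.sum) le_rfl
    (PySem.Int.mod_nonneg k hs) (PySem.Int.mod_lt k hs) (by simp)
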